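-- pv_equiv track=rewrite | github.com/posl/comment_recommendation | script/mod_gen/1_time/zh/238_D/9.py | solve
-- ===== SOURCE A (Python) =====
-- def solve(a, s):
--     if a > s:
--         return "No"
--     elif a == s:
--         return "Yes"
--     else:
--         if s % 2 == 1:
--             return "No"
--         else:
--             if a % 2 == 1:
--                 return "Yes"
--             else:
--                 return solve(a >> 1, s >> 1)
-- ===== SOURCE B (Python) =====
-- def _tz(n):
--     # trailing zeros of a positive integer
--     k = 0
--     while n % 2 == 0:
--         n //= 2
--         k += 1
--     return k
--
--
-- def solve(a, s):
--     # Closed-form: strip the recursion. For a < s, the halving cascade ends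
--     # "Yes" exactly when a becomes odd strictly before s does, i.e. when
--     # a != 0 and (s == 0 or a has fewer trailing zero bits than s).
--     if a > s:
--         return "No"
--     if a == s:
--         return "Yes"
--     if a != 0 and (s == 0 or _tz(abs(a)) < _tz(abs(s))):
--         return "Yes"
--     return "No"
-- ===== Notes on version B (the rewrite author's own statement) =====
-- stated objective: alternative
-- what changed: Replaces the simultaneous-halving recursion by a direct closed-form test: for a < s the answer is Yes exactly when a != 0 and (s == 0 or |a| has fewer trailing zero bits than |s|), computed by two independent trailing-zero counts.
import Mathlib
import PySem

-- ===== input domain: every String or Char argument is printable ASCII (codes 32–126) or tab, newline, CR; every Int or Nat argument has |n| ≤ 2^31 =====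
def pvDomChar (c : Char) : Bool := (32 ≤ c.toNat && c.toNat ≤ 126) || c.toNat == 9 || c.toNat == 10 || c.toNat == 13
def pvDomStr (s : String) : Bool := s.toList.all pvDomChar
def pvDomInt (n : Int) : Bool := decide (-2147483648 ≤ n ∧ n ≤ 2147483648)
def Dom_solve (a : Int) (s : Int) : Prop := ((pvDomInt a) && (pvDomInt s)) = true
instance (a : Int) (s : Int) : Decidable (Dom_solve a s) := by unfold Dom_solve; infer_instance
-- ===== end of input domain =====

-- B replaces A's simultaneous-halving recursion by a closed-form trailing-zeros comparison (alternative decomposition, same cost).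

-- ===== PORT A =====
-- literal transliteration of A; 'a >> 1' is Python floor division by 2 = PySem.Int.floordiv a 2.
-- The recursion is expressed with a fuel parameter (a pure totality guard: fuel = |a| + |s| + 1
-- strictly exceeds the halving measure, so the 0 branch is never reached; proved in `solveGo_eq` below).
def solveGo : Nat → Int → Int → String
  | 0, _, _ => "No"
  | fuel+1, a, s =>
    if a > s then "No"
    else if a = s then "Yes"
    else if PySem.Int.mod s 2 = 1 then "No"
    else if PySem.Int.mod a 2 = 1 then "Yes"
    else solveGo fuel (PySem.Int.floordiv a 2) (PySem.Int.floordiv s 2)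

def solve (a : Int) (s : Int) : String := solveGo (a.natAbs + s.natAbs + 1) a s

-- ===== PORT B =====
-- port of Source B's _tz (trailing-zero count of a positive integer), again with a fuel totality guard:
-- fuel = n suffices since n halves each step (proved in `tzGo_irrel` below); _tz is never called on 0.
def tzGo : Nat → Nat → Nat
  | 0, _ => 0
  | fuel+1, n => if n ≠ 0 ∧ n % 2 = 0 then tzGo fuel (n / 2) + 1 else 0

def tzN (n : Nat) : Nat := tzGo n n

-- literal transliteration of Source B's solve; Python's abs on int is Int.natAbs (as a Nat, the argument of _tz)
def solve_alt (a : Int) (s : Int) : String :=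
  if a > s then "No"
  else if a = s then "Yes"
  else if a ≠ 0 ∧ (s = 0 ∨ tzN a.natAbs < tzN s.natAbs) then "Yes"
  else "No"

-- ===== PRECONDITION & SPEC =====
def Spec_solve (a : Int) (s : Int) (out : String) : Prop := out = solve_alt a s
instance (a : Int) (s : Int) (out : String) : Decidable (Spec_solve a s out) := by unfold Spec_solve; infer_instance

-- ===== CLAIM (what is proved, stated in full; the proofs are below) =====
def Claim_equal_solve : Prop := ∀ (a : Int) (s : Int), Dom_solve a s → Spec_solve a s (solve a s)

-- ===== LEMMAS AND PROOFS =====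
theorem tzGo_irrel : ∀ (f g n : Nat), n ≤ f → n ≤ g → tzGo f n = tzGo g n := by
  intro f
  induction f with
  | zero =>
    intro g n hf _
    interval_cases n
    cases g <;> simp [tzGo]
  | succ f ih =>
    intro g n hf hg
    match g, n with
    | 0, n =>
      interval_cases n
      simp [tzGo]
    | g+1, n =>
      rw [tzGo, tzGo]
      by_cases hc : n ≠ 0 ∧ n % 2 = 0
      · rw [if_pos hc, if_pos hc, ih g (n / 2) (by omega) (by omega)]
      · rw [if_neg hc, if_neg hc]

theorem tzN_odd {n : Nat} (h : n % 2 = 1) : tzN n = 0 := by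
  match n with
  | 0 => simp at h
  | m+1 => rw [tzN, tzGo, if_neg (by omega)]

theorem tzN_double {n : Nat} (h0 : n ≠ 0) : tzN (2 * n) = tzN n + 1 := by
  obtain ⟨m, hm⟩ : ∃ m, 2 * n = m + 1 := ⟨2 * n - 1, by omega⟩
  rw [tzN, hm, tzGo, if_pos ⟨by omega, by omega⟩]
  have hdiv : (m + 1) / 2 = n := by omega
  rw [hdiv, tzN]
  congr 1
  exact tzGo_irrel m n n (by omega) le_rfl

theorem solveGo_eq : ∀ (fuel : Nat) (a s : Int), a.natAbs + s.natAbs < fuel →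
    solveGo fuel a s = solve_alt a s := by
  intro fuel
  induction fuel with
  | zero => intro a s h; omega
  | succ f ih =>
    intro a s hfuel
    rw [solveGo]
    by_cases h1 : a > s
    · rw [if_pos h1, solve_alt, if_pos h1]
    rw [if_neg h1]
    by_cases h2 : a = s
    · rw [if_pos h2, solve_alt, if_neg h1, if_pos h2]
    rw [if_neg h2]
    by_cases h3 : PySem.Int.mod s 2 = 1
    · -- s odd ⇒ "No" on both sides
      have hs2 : s % 2 = 1 := by
        rw [PySem.Int.mod_eq_emod_of_pos (by omega : (0:Int) < 2)] at h3; exact h3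
      have hsn : s.natAbs % 2 = 1 := by omega
      rw [if_pos h3, solve_alt, if_neg h1, if_neg h2, if_neg]
      rintro ⟨-, hd | hd⟩
      · omega
      · rw [tzN_odd hsn] at hd; omega
    rw [if_neg h3]
    have hs2 : s % 2 = 0 := by
      rw [PySem.Int.mod_eq_emod_of_pos (by omega : (0:Int) < 2)] at h3; omega
    by_cases h4 : PySem.Int.mod a 2 = 1
    · -- a odd ⇒ "Yes" on both sides
      have ha2 : a % 2 = 1 := by
        rw [PySem.Int.mod_eq_emod_of_pos (by omega : (0:Int) < 2)] at h4; exact h4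
      have han : a.natAbs % 2 = 1 := by omega
      have hc : a ≠ 0 ∧ (s = 0 ∨ tzN a.natAbs < tzN s.natAbs) := by
        refine ⟨by omega, ?_⟩
        by_cases hs0 : s = 0
        · exact Or.inl hs0
        · refine Or.inr ?_
          obtain ⟨m, hm⟩ : ∃ m, s.natAbs = 2 * m := ⟨s.natAbs / 2, by omega⟩
          rw [tzN_odd han, hm, tzN_double (by omega)]
          omega
      rw [if_pos h4, solve_alt, if_neg h1, if_neg h2, if_pos hc]
    -- both even: the closed form is invariant under halving
    have ha2 : a % 2 = 0 := by
      rw [PySem.Int.mod_eq_emod_of_pos (by omega : (0:Int) < 2)] at h4; omega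
    obtain ⟨x, hx⟩ : (2:Int) ∣ a := ⟨a / 2, by omega⟩
    obtain ⟨y, hy⟩ : (2:Int) ∣ s := ⟨s / 2, by omega⟩
    have hfa : PySem.Int.floordiv a 2 = x := by
      rw [PySem.Int.floordiv_eq_ediv_of_pos (by omega : (0:Int) < 2), hx,
        Int.mul_ediv_cancel_left x (by omega)]
    have hfs : PySem.Int.floordiv s 2 = y := by
      rw [PySem.Int.floordiv_eq_ediv_of_pos (by omega : (0:Int) < 2), hy,
        Int.mul_ediv_cancel_left y (by omega)]
    have hxy : x < y := by omega
    have hna : a.natAbs = 2 * x.natAbs := by omega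
    have hns : s.natAbs = 2 * y.natAbs := by omega
    rw [if_neg h4, hfa, hfs, ih x y (by omega)]
    rw [solve_alt, solve_alt, if_neg (show ¬ x > y by omega), if_neg (show x ≠ y by omega),
      if_neg h1, if_neg h2]
    by_cases hx0 : x = 0
    · rw [if_neg (by rintro ⟨h, -⟩; omega), if_neg (by rintro ⟨h, -⟩; omega)]
    · have ha0 : a ≠ 0 := by omega
      by_cases hy0 : y = 0
      · rw [if_pos ⟨hx0, Or.inl hy0⟩, if_pos ⟨ha0, Or.inl (by omega)⟩]
      · have htx : tzN a.natAbs = tzN x.natAbs + 1 := by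
          rw [hna, tzN_double (by omega)]
        have hty : tzN s.natAbs = tzN y.natAbs + 1 := by
          rw [hns, tzN_double (by omega)]
        by_cases ht : tzN x.natAbs < tzN y.natAbs
        · rw [if_pos ⟨hx0, Or.inr ht⟩, if_pos ⟨ha0, Or.inr (by omega)⟩]
        · rw [if_neg (by rintro ⟨-, h | h⟩ <;> omega),
            if_neg (by rintro ⟨-, h | h⟩ <;> omega)]

-- ===== VERDICT (by name: the statement is the Claim_ definition above) =====
theorem solve_spec : Claim_equal_solve := by
  intro a s _
  unfold Spec_solve
  rw [solve]
  exact solveGo_eq _ a s (by omega)
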